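-- pv_equiv track=rewrite | github.com/Mi524/common_utils_data | common_utils_data/sequence_functions.py | list_diff_outer_join
-- ===== SOURCE A (Python) =====
-- def list_diff_outer_join(split_result, findall_result):
-- 	#寻找没有匹配上的集合，求两个列表的outer join差集
-- 	not_match_list = [ ]
-- 	for elem_f in findall_result:
-- 		while split_result :
-- 			elem_s = split_result.pop(0)
-- 			if elem_s != elem_f :
-- 				not_match_list.append(elem_s)
-- 			else :
-- 				break
--
-- 	return [ x for x in not_match_list + split_result if x != '' ]
-- ===== SOURCE B (Python) =====
-- # Single forward scan with an index pointer (no pop(0)): O(n+m) instead of A's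
-- # quadratic front-popping. Return-value equivalent; unlike A, B does NOT mutate
-- # split_result in place (A consumes it with pop(0)).
-- def list_diff_outer_join(split_result, findall_result):
--     res = []
--     i = 0
--     n = len(split_result)
--     for f in findall_result:
--         if i >= n:
--             break
--         try:
--             j = split_result.index(f, i)
--         except ValueError:
--             res.extend(split_result[i:])
--             i = n
--         else:
--             res.extend(split_result[i:j])
--             i = j + 1
--     res.extend(split_result[i:])
--     return [x for x in res if x != '']
-- ===== Notes on version B (the rewrite author's own statement) =====
-- stated objective: faster
-- what changed: Replaces A's nested while-loop that repeatedly pops the front of split_result with a single forward scan using an index pointer (list.index with a start offset), building the result in one pass; B does not mutate split_result.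
import Mathlib
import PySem

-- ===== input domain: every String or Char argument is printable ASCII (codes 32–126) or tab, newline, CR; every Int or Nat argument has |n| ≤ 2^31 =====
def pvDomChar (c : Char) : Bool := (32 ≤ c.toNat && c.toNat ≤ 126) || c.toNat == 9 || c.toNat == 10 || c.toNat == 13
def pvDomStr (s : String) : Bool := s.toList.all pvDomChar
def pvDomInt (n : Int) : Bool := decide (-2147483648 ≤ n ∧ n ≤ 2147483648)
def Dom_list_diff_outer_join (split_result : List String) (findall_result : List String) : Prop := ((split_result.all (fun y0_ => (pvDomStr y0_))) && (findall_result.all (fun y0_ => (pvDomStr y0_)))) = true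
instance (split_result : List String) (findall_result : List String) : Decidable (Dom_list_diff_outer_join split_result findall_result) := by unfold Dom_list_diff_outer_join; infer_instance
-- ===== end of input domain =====

-- B replaces A's repeated pop(0) (quadratic front-popping) with a single forward
-- scan over split_result using an index pointer; return-value equivalence only:
-- A mutates split_result in place (pop(0)), B does not.

-- ===== PORT A =====
-- A's inner `while split_result: elem_s = pop(0); if != f append else break`:
-- returns (elements appended to not_match_list, remaining split_result).
def aConsume (f : String) : List String → List String × List String
  | [] => ([], [])
  | s :: rest =>
      if s ≠ f then
        let p := aConsume f rest
        (s :: p.1, p.2)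
      else ([], rest)

-- one iteration of A's outer `for elem_f in findall_result`
def aStep (st : List String × List String) (f : String) : List String × List String :=
  let p := aConsume f st.2
  (st.1 ++ p.1, p.2)

def list_diff_outer_join (split_result : List String) (findall_result : List String) : List String :=
  let st := findall_result.foldl aStep ([], split_result)
  (st.1 ++ st.2).filter (fun x => x ≠ "")

-- ===== PORT B =====
-- split_result.index(f, i) relative to the suffix split_result[i:], as an Option:
-- none is Python's ValueError branch.
def bFind (f : String) : List String → Option Nat
  | [] => none
  | x :: xs => if x = f then some 0 else (bFind f xs).map (· + 1)

-- one iteration of B's loop; state (res, i).  B's `break` once i = n leaves the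
-- state unchanged for all later iterations, modeled as the identity branch.
def bStep (split : List String) (st : List String × Nat) (f : String) : List String × Nat :=
  if st.2 ≥ split.length then st
  else
    match bFind f (split.drop st.2) with
    | none => (st.1 ++ split.drop st.2, split.length)
    | some j => (st.1 ++ (split.drop st.2).take j, st.2 + (j + 1))

def list_diff_outer_join_alt (split_result : List String) (findall_result : List String) : List String :=
  let st := findall_result.foldl (bStep split_result) ([], 0)
  (st.1 ++ split_result.drop st.2).filter (fun x => x ≠ "")

-- ===== PRECONDITION & SPEC =====
def Spec_list_diff_outer_join (split_result : List String) (findall_result : List String) (out : List String) : Prop := out = list_diff_outer_join_alt split_result findall_result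
instance (split_result : List String) (findall_result : List String) (out : List String) : Decidable (Spec_list_diff_outer_join split_result findall_result out) := by unfold Spec_list_diff_outer_join; infer_instance

-- ===== CLAIM (what is proved, stated in full; the proofs are below) =====
def Claim_equal_list_diff_outer_join : Prop := ∀ (split_result : List String) (findall_result : List String), Dom_list_diff_outer_join split_result findall_result → Spec_list_diff_outer_join split_result findall_result (list_diff_outer_join split_result findall_result)

-- ===== LEMMAS AND PROOFS =====

-- A's inner while-loop, characterised by the position of the first match.
lemma aConsume_eq (f : String) (rest : List String) :
    aConsume f rest =
      match bFind f rest with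
      | none => (rest, [])
      | some j => (rest.take j, rest.drop (j + 1)) := by
  induction rest with
  | nil => simp [aConsume, bFind]
  | cons x xs ih =>
      by_cases hx : x = f
      · simp [aConsume, bFind, hx]
      · simp only [aConsume, bFind, if_neg hx, if_pos hx, ne_eq]
        rw [ih]
        cases h : bFind f xs with
        | none => simp
        | some j => simp [List.take_succ_cons, List.drop_succ_cons]

-- the loop invariant: A's state is (B's res, split.drop (B's i))
lemma loop_eq (split : List String) (fs : List String) :
    ∀ (nm : List String) (i : Nat),
      fs.foldl aStep (nm, split.drop i) =
        ((fs.foldl (bStep split) (nm, i)).1,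
          split.drop (fs.foldl (bStep split) (nm, i)).2) := by
  induction fs with
  | nil => intro nm i; simp
  | cons f fs ih =>
      intro nm i
      simp only [List.foldl_cons]
      by_cases hi : i ≥ split.length
      · have hd : split.drop i = [] := List.drop_eq_nil_of_le hi
        have hstep : aStep (nm, split.drop i) f = (nm, split.drop i) := by
          simp [aStep, hd, aConsume]
        rw [hstep, bStep, if_pos hi]
        exact ih nm i
      · rw [bStep, if_neg hi]
        cases h : bFind f (split.drop i) with
        | none =>
            have : aStep (nm, split.drop i) f = (nm ++ split.drop i, []) := by
              simp [aStep, aConsume_eq, h]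
            rw [this]
            have h0 : ([] : List String) = split.drop split.length := by simp
            rw [h0, ih]
        | some j =>
            have : aStep (nm, split.drop i) f
                = (nm ++ (split.drop i).take j, split.drop (i + (j + 1))) := by
              simp [aStep, aConsume_eq, h, List.drop_drop]
            rw [this, ih]

-- ===== VERDICT (by name: the statement is the Claim_ definition above) =====
theorem list_diff_outer_join_spec : Claim_equal_list_diff_outer_join := by
  intro split findall _
  unfold Spec_list_diff_outer_join list_diff_outer_join list_diff_outer_join_alt
  have := loop_eq split findall [] 0
  simp only [List.drop_zero] at this
  rw [this]
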